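-- pv_equiv track=rewrite | github.com/lrtsuser/LRTS | scripts/evaluation/extract_change_features.py | remove_tuples_with_existing_data
-- ===== SOURCE A (Python) =====
-- def remove_tuples_with_existing_data(test_file_set, file_path_dists, file_path_tok_sims, file_name_dists):
--     ret = []
--     for test, file in test_file_set:
--         if test in file_path_dists and file in file_path_dists[test]:
--             continue
--         if test in file_path_tok_sims and file in file_path_tok_sims[test]:
--             continue
--         if test in file_name_dists and file in file_name_dists[test]:
--             continue
--         ret.append((test, file))
--     return ret
-- ===== SOURCE B (Python) =====
-- def remove_tuples_with_existing_data(test_file_set, file_path_dists, file_path_tok_sims, file_name_dists):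
--     existing = set()
--     for d in (file_path_dists, file_path_tok_sims, file_name_dists):
--         for t, inner in d.items():
--             for f in inner:
--                 existing.add((t, f))
--     return [(test, file) for test, file in test_file_set if (test, file) not in existing]
-- ===== Notes on version B (the rewrite author's own statement) =====
-- stated objective: alternative
-- what changed: Instead of probing three nested dicts per tuple, B first flattens the three dicts into one set of (test, file) pairs and then filters test_file_set with a single set-membership test per tuple.
import Mathlib
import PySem

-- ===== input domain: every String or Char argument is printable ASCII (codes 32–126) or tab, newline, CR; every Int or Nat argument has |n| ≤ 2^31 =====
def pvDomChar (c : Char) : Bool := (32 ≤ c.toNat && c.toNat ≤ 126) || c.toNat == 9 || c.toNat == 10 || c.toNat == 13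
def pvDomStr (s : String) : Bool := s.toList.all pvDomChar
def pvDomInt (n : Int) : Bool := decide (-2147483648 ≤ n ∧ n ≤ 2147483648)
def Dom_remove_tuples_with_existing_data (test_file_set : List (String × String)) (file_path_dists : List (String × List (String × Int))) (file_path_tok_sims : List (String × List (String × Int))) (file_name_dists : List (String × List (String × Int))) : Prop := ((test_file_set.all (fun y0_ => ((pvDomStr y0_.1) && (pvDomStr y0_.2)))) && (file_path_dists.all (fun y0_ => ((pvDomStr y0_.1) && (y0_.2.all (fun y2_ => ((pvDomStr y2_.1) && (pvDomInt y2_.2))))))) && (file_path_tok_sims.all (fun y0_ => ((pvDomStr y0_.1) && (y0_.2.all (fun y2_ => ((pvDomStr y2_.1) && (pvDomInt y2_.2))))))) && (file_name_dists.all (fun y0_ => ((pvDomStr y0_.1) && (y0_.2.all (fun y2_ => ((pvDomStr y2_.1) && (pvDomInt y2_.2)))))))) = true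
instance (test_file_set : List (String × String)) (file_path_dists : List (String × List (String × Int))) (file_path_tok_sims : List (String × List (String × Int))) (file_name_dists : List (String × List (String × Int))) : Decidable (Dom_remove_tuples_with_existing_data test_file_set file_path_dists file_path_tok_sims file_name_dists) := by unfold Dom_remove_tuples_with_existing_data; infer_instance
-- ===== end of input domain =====

-- B flattens the three nested dicts into one set of (test, file) pairs once and filters
-- test_file_set with a single membership test per tuple (alternative decomposition, same cost).

-- ===== PORT A =====
-- One Python probe 'test in d and file in d[test]' on a dict d (transliterated: key membership, then
-- membership among the keys of the inner dict d[test]; the lookup is guarded by the first conjunct).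
def pvProbe (d : List (String × List (String × Int))) (test file : String) : Bool :=
  (PySem.Dict.mk d).contains test &&
    (PySem.Dict.mk ((PySem.Dict.mk d).getD test [])).contains file

def remove_tuples_with_existing_data (test_file_set : List (String × String)) (file_path_dists : List (String × List (String × Int))) (file_path_tok_sims : List (String × List (String × Int))) (file_name_dists : List (String × List (String × Int))) : List (String × String) :=
  test_file_set.foldl (fun ret p =>
    let test := p.1
    let file := p.2
    if pvProbe file_path_dists test file then ret
    else if pvProbe file_path_tok_sims test file then ret
    else if pvProbe file_name_dists test file then ret
    else ret ++ [(test, file)]) []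

-- ===== PORT B =====
def remove_tuples_with_existing_data_alt (test_file_set : List (String × String)) (file_path_dists : List (String × List (String × Int))) (file_path_tok_sims : List (String × List (String × Int))) (file_name_dists : List (String × List (String × Int))) : List (String × String) :=
  -- existing = set(); for d in (…): for t, inner in d.items(): for f in inner: existing.add((t, f))
  let existing : PySem.Set (String × String) :=
    (file_path_dists ++ file_path_tok_sims ++ file_name_dists).foldl
      (fun s p => p.2.foldl (fun s q => PySem.Set.add s (p.1, q.1)) s) PySem.Set.empty
  test_file_set.filter (fun p => !(PySem.Set.contains existing p))

-- ===== PRECONDITION & SPEC =====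
-- Pre_ excludes association lists whose outer key list has duplicates: such a list does not arise from
-- any Python dict (dict keys are unique), and on it A's first-match lookup and B's scan over all pairs
-- are both accidental readings of a non-dict value.
def Pre_remove_tuples_with_existing_data (test_file_set : List (String × String)) (file_path_dists : List (String × List (String × Int))) (file_path_tok_sims : List (String × List (String × Int))) (file_name_dists : List (String × List (String × Int))) : Prop :=
  (file_path_dists.map Prod.fst).Nodup ∧ (file_path_tok_sims.map Prod.fst).Nodup ∧ (file_name_dists.map Prod.fst).Nodup
instance (test_file_set : List (String × String)) (file_path_dists : List (String × List (String × Int))) (file_path_tok_sims : List (String × List (String × Int))) (file_name_dists : List (String × List (String × Int))) : Decidable (Pre_remove_tuples_with_existing_data test_file_set file_path_dists file_path_tok_sims file_name_dists) := by unfold Pre_remove_tuples_with_existing_data; infer_instance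

def pvWitness_remove_tuples_with_existing_data : (List (String × String)) × (List (String × List (String × Int))) × (List (String × List (String × Int))) × (List (String × List (String × Int))) :=
  ([("t1", "f1"), ("t2", "f2")], [("t1", [("f1", 3)])], [], [("t2", [("g", 0)])])

def Spec_remove_tuples_with_existing_data (test_file_set : List (String × String)) (file_path_dists : List (String × List (String × Int))) (file_path_tok_sims : List (String × List (String × Int))) (file_name_dists : List (String × List (String × Int))) (out : List (String × String)) : Prop := out = remove_tuples_with_existing_data_alt test_file_set file_path_dists file_path_tok_sims file_name_dists
instance (test_file_set : List (String × String)) (file_path_dists : List (String × List (String × Int))) (file_path_tok_sims : List (String × List (String × Int))) (file_name_dists : List (String × List (String × Int))) (out : List (String × String)) : Decidable (Spec_remove_tuples_with_existing_data test_file_set file_path_dists file_path_tok_sims file_name_dists out) := by unfold Spec_remove_tuples_with_existing_data; infer_instance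

-- ===== CLAIM (what is proved, stated in full; the proofs are below) =====
def Claim_equal_remove_tuples_with_existing_data : Prop := ∀ (test_file_set : List (String × String)) (file_path_dists : List (String × List (String × Int))) (file_path_tok_sims : List (String × List (String × Int))) (file_name_dists : List (String × List (String × Int))), Dom_remove_tuples_with_existing_data test_file_set file_path_dists file_path_tok_sims file_name_dists → Pre_remove_tuples_with_existing_data test_file_set file_path_dists file_path_tok_sims file_name_dists → Spec_remove_tuples_with_existing_data test_file_set file_path_dists file_path_tok_sims file_name_dists (remove_tuples_with_existing_data test_file_set file_path_dists file_path_tok_sims file_name_dists)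

-- ===== LEMMAS AND PROOFS =====

-- Membership in the set B builds by the nested add-loop.
theorem mem_build_existing (ds : List (String × List (String × Int))) (s : PySem.Set (String × String)) (y : String × String) :
    y ∈ ds.foldl (fun s p => p.2.foldl (fun s q => PySem.Set.add s (p.1, q.1)) s) s ↔
      y ∈ s ∨ ∃ p ∈ ds, ∃ q ∈ p.2, y = (p.1, q.1) := by
  induction ds generalizing s with
  | nil => simp
  | cons p ds ih =>
    simp only [List.foldl_cons, ih, PySem.Set.mem_foldl_add, List.mem_cons]
    constructor
    · rintro ((h | ⟨q, hq, rfl⟩) | ⟨r, hr, q, hq, rfl⟩)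
      · exact Or.inl h
      · exact Or.inr ⟨p, Or.inl rfl, q, hq, rfl⟩
      · exact Or.inr ⟨r, Or.inr hr, q, hq, rfl⟩
    · rintro (h | ⟨r, (rfl | hr), q, hq, rfl⟩)
      · exact Or.inl (Or.inl h)
      · exact Or.inl (Or.inr ⟨q, hq, rfl⟩)
      · exact Or.inr ⟨r, hr, q, hq, rfl⟩

-- A's probe characterised, for an association list with unique outer keys.
theorem pvProbe_iff (d : List (String × List (String × Int))) (t f : String)
    (hnd : (d.map Prod.fst).Nodup) :
    pvProbe d t f = true ↔ ∃ p ∈ d, ∃ q ∈ p.2, (t, f) = (p.1, q.1) := by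
  have hkeys : (PySem.Dict.mk d).keys = d.map Prod.fst := rfl
  constructor
  · rintro h
    rw [pvProbe, Bool.and_eq_true] at h
    obtain ⟨h1, h2⟩ := h
    rw [PySem.Dict.contains_iff_mem_keys, hkeys, List.mem_map] at h1
    obtain ⟨p, hp, hpt⟩ := h1
    have hget : (PySem.Dict.mk d).get? t = some p.2 := by
      rw [PySem.Dict.get?_eq_some_iff_mem_items _ _ _ (by rw [hkeys]; exact hnd)]
      show (t, p.2) ∈ d
      rw [← hpt]; simpa using hp
    rw [PySem.Dict.getD_eq_get?_getD, hget] at h2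
    rw [PySem.Dict.contains_iff_mem_keys] at h2
    simp only [PySem.Dict.keys, List.mem_map] at h2
    obtain ⟨q, hq, hqf⟩ := h2
    exact ⟨p, hp, q, hq, by rw [hpt, hqf]⟩
  · rintro ⟨p, hp, q, hq, heq⟩
    obtain ⟨h1, h2⟩ := Prod.mk.injEq .. ▸ heq
    rw [pvProbe, Bool.and_eq_true]
    constructor
    · rw [PySem.Dict.contains_iff_mem_keys, hkeys, List.mem_map]
      exact ⟨p, hp, h1.symm⟩
    · have hget : (PySem.Dict.mk d).get? t = some p.2 := by
        rw [PySem.Dict.get?_eq_some_iff_mem_items _ _ _ (by rw [hkeys]; exact hnd)]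
        show (t, p.2) ∈ d
        rw [h1]; simpa using hp
      rw [PySem.Dict.getD_eq_get?_getD, hget]
      rw [PySem.Dict.contains_iff_mem_keys]
      simp only [PySem.Dict.keys, List.mem_map]
      exact ⟨q, hq, h2.symm⟩

-- ===== VERDICT (by name: the statement is the Claim_ definition above) =====
theorem remove_tuples_with_existing_data_spec : Claim_equal_remove_tuples_with_existing_data := by
  intro tfs d1 d2 d3 _ hpre
  obtain ⟨h1, h2, h3⟩ := hpre
  show remove_tuples_with_existing_data tfs d1 d2 d3 = remove_tuples_with_existing_data_alt tfs d1 d2 d3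
  unfold remove_tuples_with_existing_data remove_tuples_with_existing_data_alt
  have hshape :
      (fun (ret : List (String × String)) (p : String × String) =>
        let test := p.1; let file := p.2
        if pvProbe d1 test file then ret
        else if pvProbe d2 test file then ret
        else if pvProbe d3 test file then ret
        else ret ++ [(test, file)]) =
      (fun ret p =>
        if (!(pvProbe d1 p.1 p.2 || pvProbe d2 p.1 p.2 || pvProbe d3 p.1 p.2)) = true
        then ret ++ [id p] else ret) := by
    funext ret p
    by_cases c1 : pvProbe d1 p.1 p.2 <;> by_cases c2 : pvProbe d2 p.1 p.2 <;>
      by_cases c3 : pvProbe d3 p.1 p.2 <;> simp [c1, c2, c3]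
  rw [hshape, PySem.List.foldl_append_if, List.map_id, List.nil_append]
  apply List.filter_congr
  intro p _
  have hmem : (PySem.Set.contains
      ((d1 ++ d2 ++ d3).foldl (fun s p => p.2.foldl (fun s q => PySem.Set.add s (p.1, q.1)) s)
        PySem.Set.empty) p) =
      (pvProbe d1 p.1 p.2 || pvProbe d2 p.1 p.2 || pvProbe d3 p.1 p.2) := by
    rcases hb : (pvProbe d1 p.1 p.2 || pvProbe d2 p.1 p.2 || pvProbe d3 p.1 p.2) with _ | _
    · rw [Bool.eq_false_iff]
      intro hc
      rw [PySem.Set.contains_iff, mem_build_existing] at hc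
      rcases hc with h | ⟨r, hr, q, hq, hpq⟩
      · simp [PySem.Set.empty] at h
      · rw [List.append_assoc, List.mem_append, List.mem_append] at hr
        have : (p.1, p.2) = (r.1, q.1) := by rw [← hpq]
        rcases hr with hr | hr | hr
        · rw [(pvProbe_iff d1 p.1 p.2 h1).mpr ⟨r, hr, q, hq, this⟩] at hb; simp at hb
        · rw [(pvProbe_iff d2 p.1 p.2 h2).mpr ⟨r, hr, q, hq, this⟩] at hb; simp at hb
        · rw [(pvProbe_iff d3 p.1 p.2 h3).mpr ⟨r, hr, q, hq, this⟩] at hb; simp at hb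
    · rw [PySem.Set.contains_iff, mem_build_existing]
      rw [Bool.or_eq_true, Bool.or_eq_true] at hb
      refine Or.inr ?_
      rcases hb with (hb | hb) | hb
      · obtain ⟨r, hr, q, hq, heq⟩ := (pvProbe_iff d1 p.1 p.2 h1).mp hb
        exact ⟨r, by simp [hr], q, hq, by rw [← heq]⟩
      · obtain ⟨r, hr, q, hq, heq⟩ := (pvProbe_iff d2 p.1 p.2 h2).mp hb
        exact ⟨r, by simp [hr], q, hq, by rw [← heq]⟩
      · obtain ⟨r, hr, q, hq, heq⟩ := (pvProbe_iff d3 p.1 p.2 h3).mp hb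
        exact ⟨r, by simp [hr], q, hq, by rw [← heq]⟩
  rw [hmem]
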